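-- pv_equiv track=rewrite | github.com/realronaldrump/everystreet-new | trips/services/trip_history_import_service_config.py | resolve_import_imeis
-- ===== SOURCE A (Python) =====
-- def resolve_import_imeis(
--     authorized_imeis: list[str] | None,
--     selected_imeis: list[str] | None = None,
-- ) -> list[str]:
--     """Return a de-duplicated, authorized import IMEI list."""
--     normalized_authorized: list[str] = []
--     seen_authorized: set[str] = set()
--     for raw in authorized_imeis or []:
--         imei = str(raw or "").strip()
--         if not imei or imei in seen_authorized:
--             continue
--         seen_authorized.add(imei)
--         normalized_authorized.append(imei)
--
--     if selected_imeis is None: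
--         return normalized_authorized
--
--     selected_set = {
--         str(raw or "").strip() for raw in selected_imeis if str(raw or "").strip()
--     }
--     if not selected_set:
--         return []
--
--     return [imei for imei in normalized_authorized if imei in selected_set]
-- ===== SOURCE B (Python) =====
-- def resolve_import_imeis(
--     authorized_imeis,
--     selected_imeis=None,
-- ):
--     """Return a de-duplicated, authorized import IMEI list.
--
--     Dedup by iterated nub: repeatedly take the head and filter its later
--     duplicates out of the remainder -- no auxiliary seen-set.
--     """
--     norm = [s for s in (str(raw or "").strip() for raw in authorized_imeis or []) if s]
--     deduped = _nub(norm)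
--     if selected_imeis is None:
--         return deduped
--     sel = {s for s in (str(raw or "").strip() for raw in selected_imeis) if s}
--     if not sel:
--         return []
--     return [v for v in deduped if v in sel]
--
--
-- def _nub(xs):
--     out = []
--     while xs:
--         head = xs[0]
--         out.append(head)
--         xs = [x for x in xs[1:] if x != head]
--     return out
-- ===== Notes on version B (the rewrite author's own statement) =====
-- stated objective: alternative
-- what changed: B first builds the normalized non-empty list, then deduplicates it by an iterated nub (each step keeps the head and filters its later duplicates out of the remainder -- no seen-set or hashing at all), then filters by the selection; A maintains a running seen-set in one imperative loop and filters afterwards.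
import Mathlib
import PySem

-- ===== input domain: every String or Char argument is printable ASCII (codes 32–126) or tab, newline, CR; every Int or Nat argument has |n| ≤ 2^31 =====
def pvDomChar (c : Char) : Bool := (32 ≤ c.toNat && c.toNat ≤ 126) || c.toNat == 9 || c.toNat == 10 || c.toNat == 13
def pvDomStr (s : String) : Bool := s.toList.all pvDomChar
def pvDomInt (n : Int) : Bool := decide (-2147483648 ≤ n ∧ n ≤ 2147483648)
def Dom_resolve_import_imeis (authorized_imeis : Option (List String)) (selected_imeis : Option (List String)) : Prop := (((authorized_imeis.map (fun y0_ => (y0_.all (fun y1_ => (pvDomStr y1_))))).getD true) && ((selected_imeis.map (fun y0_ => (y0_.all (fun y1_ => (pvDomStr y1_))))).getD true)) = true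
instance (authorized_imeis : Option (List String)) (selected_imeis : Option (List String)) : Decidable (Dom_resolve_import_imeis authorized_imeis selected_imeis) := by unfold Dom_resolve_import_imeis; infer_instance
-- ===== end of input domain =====

-- B deduplicates by an iterated nub (each step keeps the head and filters its later duplicates out of the rest)
-- over the normalized non-empty list, instead of A's seen-set loop (objective: alternative).


-- ===== PORT A =====
-- str(raw or "").strip(): for a str argument, `raw or ""` is raw itself when non-empty, "" otherwise
def pvNormA (raw : String) : String := PySem.Str.strip (if raw == "" then "" else raw)

-- one iteration of A's dedup loop: state = (normalized_authorized, seen_authorized)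
def pvAStep (st : List String × PySem.Set String) (raw : String) : List String × PySem.Set String :=
  let imei := pvNormA raw
  if imei == "" || PySem.Set.contains st.2 imei then st
  else (st.1 ++ [imei], PySem.Set.add st.2 imei)

def resolve_import_imeis (authorized_imeis : Option (List String)) (selected_imeis : Option (List String)) : List String :=
  let normalized := ((authorized_imeis.getD []).foldl pvAStep ([], PySem.Set.empty)).1
  match selected_imeis with
  | none => normalized
  | some sel =>
      let selectedSet : PySem.Set String :=
        PySem.Set.ofList ((sel.map (fun raw => pvNormA raw)).filter (fun v => !(v == "")))
      if selectedSet = [] then []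
      else normalized.filter (fun imei => PySem.Set.contains selectedSet imei)

-- ===== PORT B =====
-- same Python expression str(raw or "").strip(), transcribed for B's code
def pvNormB (raw : String) : String := PySem.Str.strip (if raw == "" then "" else raw)

-- _nub's while loop: state = (out, xs); take the head, filter its later duplicates out of xs
def pvNub (out : List String) (xs : List String) : List String :=
  match xs with
  | [] => out
  | head :: t => pvNub (out ++ [head]) (t.filter (fun x => !(x == head)))
termination_by xs.length
decreasing_by
  simp only [List.length_cons, List.length_unattach]
  exact Nat.lt_succ_of_le ((List.length_filter_le _ _).trans (by simp))

def resolve_import_imeis_alt (authorized_imeis : Option (List String)) (selected_imeis : Option (List String)) : List String :=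
  let norm := ((authorized_imeis.getD []).map (fun raw => pvNormB raw)).filter (fun s => !(s == ""))
  let deduped := pvNub [] norm
  match selected_imeis with
  | none => deduped
  | some sel =>
      let selSet : PySem.Set String :=
        PySem.Set.ofList ((sel.map (fun raw => pvNormB raw)).filter (fun s => !(s == "")))
      if selSet = [] then []
      else deduped.filter (fun v => PySem.Set.contains selSet v)

-- ===== PRECONDITION & SPEC =====
def Spec_resolve_import_imeis (authorized_imeis : Option (List String)) (selected_imeis : Option (List String)) (out : List String) : Prop := out = resolve_import_imeis_alt authorized_imeis selected_imeis
instance (authorized_imeis : Option (List String)) (selected_imeis : Option (List String)) (out : List String) : Decidable (Spec_resolve_import_imeis authorized_imeis selected_imeis out) := by unfold Spec_resolve_import_imeis; infer_instance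

-- ===== CLAIM =====
def Claim_equal_resolve_import_imeis : Prop := ∀ (authorized_imeis : Option (List String)) (selected_imeis : Option (List String)), Dom_resolve_import_imeis authorized_imeis selected_imeis → Spec_resolve_import_imeis authorized_imeis selected_imeis (resolve_import_imeis authorized_imeis selected_imeis)

-- ===== LEMMAS AND PROOFS =====

-- unfolding lemmas (proof helpers only)
lemma pvNub_nil (out : List String) : pvNub out [] = out := by
  conv_lhs => rw [pvNub.eq_def]

lemma pvNub_cons' (out : List String) (head : String) (t : List String) :
    pvNub out (head :: t) = pvNub (out ++ [head]) (t.filter (fun x => !(x == head))) := by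
  conv_lhs => rw [pvNub.eq_def]

lemma pvNub_acc_aux (n : Nat) : ∀ (xs : List String), xs.length ≤ n → ∀ (out : List String),
    pvNub out xs = out ++ pvNub [] xs := by
  induction n with
  | zero =>
      intro xs h out
      rw [List.length_eq_zero_iff.mp (Nat.le_zero.mp h)]
      simp [pvNub_nil]
  | succ n ih =>
      intro xs h out
      cases xs with
      | nil => simp [pvNub_nil]
      | cons head t =>
          have hlen : (t.filter (fun x => !(x == head))).length ≤ n := by
            have := List.length_filter_le (fun x => !(x == head)) t
            simp only [List.length_cons] at h
            omega
          rw [pvNub_cons', pvNub_cons', ih _ hlen (out ++ [head]), ih _ hlen ([] ++ [head])]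
          simp

lemma pvNub_acc (out xs : List String) : pvNub out xs = out ++ pvNub [] xs :=
  pvNub_acc_aux xs.length xs le_rfl out

lemma pvNub_cons (head : String) (t : List String) :
    pvNub [] (head :: t) = head :: pvNub [] (t.filter (fun x => !(x == head))) := by
  rw [pvNub_cons', pvNub_acc]
  simp

lemma pvAStep_eq (acc : List String) (seen : PySem.Set String) (raw : String) :
    pvAStep (acc, seen) raw
      = if pvNormA raw == "" || PySem.Set.contains seen (pvNormA raw) then (acc, seen)
        else (acc ++ [pvNormA raw], PySem.Set.add seen (pvNormA raw)) := rfl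

lemma contains_add_eq (s : PySem.Set String) (a x : String) :
    PySem.Set.contains (PySem.Set.add s a) x = (PySem.Set.contains s x || x == a) := by
  rw [Bool.eq_iff_iff]
  simp [PySem.Set.mem_add]

-- A's dedup loop, re-expressed as a structural recursion (proof helper only)
def pvDedupFrom (seen : PySem.Set String) : List String → List String
  | [] => []
  | raw :: rest =>
      if pvNormA raw == "" || PySem.Set.contains seen (pvNormA raw) then pvDedupFrom seen rest
      else pvNormA raw :: pvDedupFrom (PySem.Set.add seen (pvNormA raw)) rest

lemma foldA_eq_dedupFrom (l : List String) (acc : List String) (seen : PySem.Set String) :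
    (l.foldl pvAStep (acc, seen)).1 = acc ++ pvDedupFrom seen l := by
  induction l generalizing acc seen with
  | nil => simp [pvDedupFrom]
  | cons raw rest ih =>
      rw [List.foldl_cons, pvAStep_eq, pvDedupFrom]
      cases hc : (pvNormA raw == "" || PySem.Set.contains seen (pvNormA raw)) with
      | true => simp only [if_true]; exact ih acc seen
      | false =>
          simp only [Bool.false_eq_true, if_false]
          rw [ih, List.append_assoc]
          rfl

-- the core: A's seen-set dedup = B's nub of the not-yet-seen normalized elements
lemma dedupFrom_eq_nub (l : List String) (seen : PySem.Set String) :
    pvDedupFrom seen l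
      = pvNub [] ((l.map pvNormA).filter (fun v => !(v == "") && !(PySem.Set.contains seen v))) := by
  induction l generalizing seen with
  | nil => simp [pvDedupFrom, pvNub_nil]
  | cons raw rest ih =>
      rw [pvDedupFrom, List.map_cons, List.filter_cons]
      cases h1 : (pvNormA raw == "") with
      | true =>
          simp only [h1, Bool.true_or, if_true, Bool.not_true, Bool.false_and,
            Bool.false_eq_true, reduceIte]
          exact ih seen
      | false =>
          cases h2 : PySem.Set.contains seen (pvNormA raw) with
          | true =>
              simp only [h2, Bool.false_or, if_true, Bool.not_true, Bool.and_false,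
                Bool.false_eq_true, if_false]
              exact ih seen
          | false =>
              simp only [h2, Bool.false_or, Bool.false_eq_true, if_false,
                Bool.not_false, Bool.and_self, if_true]
              have hf : ∀ (xs : List String),
                  (xs.filter (fun v => !(v == "") && !(PySem.Set.contains seen v))).filter
                      (fun x => !(x == pvNormA raw))
                    = xs.filter (fun v => !(v == "")
                        && !(PySem.Set.contains (PySem.Set.add seen (pvNormA raw)) v)) := by
                intro xs
                rw [List.filter_filter]
                refine List.filter_congr (fun x _ => ?_)
                rw [contains_add_eq]
                cases hy : (x == "") <;> cases hc : PySem.Set.contains seen x <;>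
                  cases hx : (x == pvNormA raw) <;> simp [hy, hc, hx]
              rw [pvNub_cons, hf, ih (PySem.Set.add seen (pvNormA raw))]

lemma normalized_eq_nub (l : List String) :
    (l.foldl pvAStep ([], PySem.Set.empty)).1
      = pvNub [] ((l.map pvNormB).filter (fun s => !(s == ""))) := by
  rw [foldA_eq_dedupFrom, List.nil_append, dedupFrom_eq_nub]
  congr 1
  apply List.filter_congr
  intro x _
  simp [PySem.Set.empty, PySem.Set.contains]

lemma pvNormAB : pvNormA = pvNormB := rfl

set_option maxHeartbeats 1000000 in
-- ===== VERDICT =====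
theorem resolve_import_imeis_spec : Claim_equal_resolve_import_imeis := by
  intro a s _
  show resolve_import_imeis a s = resolve_import_imeis_alt a s
  cases s with
  | none =>
      simp only [resolve_import_imeis, resolve_import_imeis_alt, normalized_eq_nub]
  | some sel =>
      simp only [resolve_import_imeis, resolve_import_imeis_alt, normalized_eq_nub, pvNormAB]
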